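-- pv_equiv track=rewrite | github.com/seanpedrick-case/llm_topic_modelling | tools/llm_api_call.py | clean_markdown_table
-- ===== SOURCE A (Python) =====
-- def clean_markdown_table(text: str):
--     # Split text into lines
--     lines = text.splitlines()
--
--     # Step 1: Identify table structure and process line continuations
--     table_rows = list()
--     current_row = None
--
--     for line in lines:
--         stripped = line.strip()
--
--         # Skip empty lines
--         if not stripped:
--             continue
--
--         # Check if this is a table row or alignment row
--         is_table_row = "|" in stripped or stripped.startswith(":-") or ":-:" in stripped
--
--         if is_table_row:
--             # If we have a current row being built, add it to our list
--             if current_row is not None: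
--                 table_rows.append(current_row)
--
--             # Start a new row
--             current_row = stripped
--         elif current_row is not None:
--             # This must be a continuation of the previous row
--             current_row += " " + stripped
--         else:
--             # Not part of the table
--             current_row = stripped
--
--     # Don't forget the last row
--     if current_row is not None:
--         table_rows.append(current_row)
--
--     # Step 2: Properly format the table
--     # First, determine the maximum number of columns
--     max_columns = 0
--     for row in table_rows:
--         cells = row.split("|")
--         # Account for rows that may not start/end with a pipe
--         if row.startswith("|"):
--             cells = cells[1:]
--         if row.endswith("|"):
--             cells = cells[:-1]
--         max_columns = max(max_columns, len(cells))
--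
--     # Now format each row
--     formatted_rows = list()
--     for row in table_rows:
--         # Ensure the row starts and ends with pipes
--         if not row.startswith("|"):
--             row = "|" + row
--         if not row.endswith("|"):
--             row = row + "|"
--
--         # Split into cells
--         cells = row.split("|")[1:-1]  # Remove empty entries from split
--
--         # Ensure we have the right number of cells
--         while len(cells) < max_columns:
--             cells.append("")
--
--         # Rebuild the row
--         formatted_row = "|" + "|".join(cells) + "|"
--         formatted_rows.append(formatted_row)
--
--     # Join everything back together
--     result = "\n".join(formatted_rows)
--
--     return result
-- ===== SOURCE B (Python) =====
-- def _cells(row):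
--     cs = row.split("|")
--     if row.startswith("|"):
--         cs = cs[1:]
--     if row.endswith("|"):
--         cs = cs[:-1]
--     return cs
--
--
-- def _is_opener(s):
--     return "|" in s or s.startswith(":-") or ":-:" in s
--
--
-- def _rows(kept):
--     # Recursive descent: consume one logical row (the head line plus the
--     # following run of non-table continuation lines), parse it into cells
--     # immediately, and recurse on the remainder. No mutable current_row.
--     if not kept:
--         return []
--     i = 1
--     while i < len(kept) and not _is_opener(kept[i]):
--         i += 1
--     return [_cells(" ".join(kept[:i]))] + _rows(kept[i:])
--
--
-- def clean_markdown_table(text: str):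
--     kept = [s for s in (ln.strip() for ln in text.splitlines()) if s]
--     parsed = _rows(kept)
--     max_columns = max(map(len, parsed), default=0)
--     return "\n".join(
--         "|" + "|".join(c + [""] * (max_columns - len(c))) + "|" for c in parsed
--     )
-- ===== Notes on version B (the rewrite author's own statement) =====
-- stated objective: alternative
-- what changed: Replaces A's stateful current_row accumulator plus two separate string re-splitting passes by a recursive descent that consumes each logical row as a run (head line + following continuation run) from the filtered stripped lines, parses it into its cell list once, and emits padded rows from those parsed lists in one pass.
import Mathlib
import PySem

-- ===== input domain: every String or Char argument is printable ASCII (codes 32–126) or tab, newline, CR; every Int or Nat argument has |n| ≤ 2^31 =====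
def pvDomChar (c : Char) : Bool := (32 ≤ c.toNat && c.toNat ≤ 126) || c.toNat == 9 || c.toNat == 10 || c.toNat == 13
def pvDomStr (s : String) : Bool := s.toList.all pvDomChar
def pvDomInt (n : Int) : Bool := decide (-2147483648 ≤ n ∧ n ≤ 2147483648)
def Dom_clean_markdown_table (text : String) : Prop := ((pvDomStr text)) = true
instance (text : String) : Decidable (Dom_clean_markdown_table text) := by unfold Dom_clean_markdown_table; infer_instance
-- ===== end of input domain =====

-- B replaces A's stateful current_row fold and double string re-splitting by a recursive
-- descent that consumes each logical row as a run (head line + continuation run), parsing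
-- it into cells once and emitting padded rows from the parsed lists; objective: simpler.


-- ===== PORT A =====
-- is_table_row = "|" in stripped or stripped.startswith(":-") or ":-:" in stripped
def pvIsTable (s : List Char) : Bool :=
  PySem.Chars.isIn ['|'] s || PySem.Chars.startswith s [':', '-'] || PySem.Chars.isIn [':', '-', ':'] s

-- one iteration of A's step-1 loop: state = (table_rows, current_row)
def pvAStep (st : List (List Char) × Option (List Char)) (line : List Char) :
    List (List Char) × Option (List Char) :=
  let stripped := PySem.Chars.strip line
  if stripped = [] then st
  else if pvIsTable stripped then
    match st.2 with
    | some c => (st.1 ++ [c], some stripped)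
    | none => (st.1, some stripped)
  else
    match st.2 with
    | some c => (st.1, some (c ++ ' ' :: stripped))
    | none => (st.1, some stripped)

-- the 'while len(cells) < max_columns: cells.append("")' loop
def pvPadWhile (cells : List (List Char)) (m : Nat) : List (List Char) :=
  if cells.length < m then pvPadWhile (cells ++ [[]]) m else cells
  termination_by m - cells.length
  decreasing_by simp_all; omega

-- the body of A's formatting loop
def pvFormatRow (max_columns : Nat) (row : List Char) : List Char :=
  let row := if ¬ PySem.Chars.startswith row ['|'] then '|' :: row else row
  let row := if ¬ PySem.Chars.endswith row ['|'] then row ++ ['|'] else row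
  let cells := ((PySem.Chars.splitOn row ['|']).drop 1).dropLast  -- row.split("|")[1:-1]
  let cells := pvPadWhile cells max_columns
  '|' :: PySem.Chars.join ['|'] cells ++ ['|']

def clean_markdown_table (text : String) : String :=
  let lines := PySem.Chars.splitlines text.toList
  let st := lines.foldl pvAStep ([], none)
  let table_rows := match st.2 with
    | some c => st.1 ++ [c]
    | none => st.1
  let max_columns := table_rows.foldl (fun m row =>
    let cells := PySem.Chars.splitOn row ['|']
    let cells := if PySem.Chars.startswith row ['|'] then cells.drop 1 else cells  -- cells[1:]
    let cells := if PySem.Chars.endswith row ['|'] then cells.dropLast else cells  -- cells[:-1]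
    max m cells.length) 0
  let formatted_rows := table_rows.foldl (fun acc row => acc ++ [pvFormatRow max_columns row]) []
  String.ofList (PySem.Chars.join ['\n'] formatted_rows)

-- ===== PORT B =====
-- _cells(row)
def pvCells (row : List Char) : List (List Char) :=
  let cs := PySem.Chars.splitOn row ['|']
  let cs := if PySem.Chars.startswith row ['|'] then cs.drop 1 else cs
  if PySem.Chars.endswith row ['|'] then cs.dropLast else cs

-- _is_opener(s)
def pvIsOpener (s : List Char) : Bool :=
  PySem.Chars.isIn ['|'] s || PySem.Chars.startswith s [':', '-'] || PySem.Chars.isIn [':', '-', ':'] s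

-- _rows(kept): the head line plus the run of non-opener continuations is one logical
-- row, parsed into cells at once; recurse on the remainder (kept[:i] / kept[i:]).
def pvRowsB : List (List Char) → List (List (List Char))
  | [] => []
  | s :: t =>
      pvCells (PySem.Chars.join [' '] (s :: t.takeWhile (fun x => !pvIsOpener x)))
        :: pvRowsB (t.dropWhile (fun x => !pvIsOpener x))
  termination_by l => l.length
  decreasing_by
    have := List.length_dropWhile_le (fun x => !pvIsOpener x) t
    simp; omega

def clean_markdown_table_alt (text : String) : String :=
  let kept := ((PySem.Chars.splitlines text.toList).map PySem.Chars.strip).filter (fun s => !s.isEmpty)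
  let parsed := pvRowsB kept
  let max_columns := parsed.foldl (fun m c => max m c.length) 0
  String.ofList (PySem.Chars.join ['\n'] (parsed.map (fun c =>
    '|' :: PySem.Chars.join ['|'] (c ++ List.replicate (max_columns - c.length) []) ++ ['|'])))

-- ===== PRECONDITION & SPEC =====
def Spec_clean_markdown_table (text : String) (out : String) : Prop := out = clean_markdown_table_alt text
instance (text : String) (out : String) : Decidable (Spec_clean_markdown_table text out) := by unfold Spec_clean_markdown_table; infer_instance

-- ===== CLAIM (what is proved, stated in full; the proofs are below) =====
def Claim_equal_clean_markdown_table : Prop := ∀ (text : String), Dom_clean_markdown_table text → Spec_clean_markdown_table text (clean_markdown_table text)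

-- ===== LEMMAS AND PROOFS =====

-- reference split-on-'|' (proof-side only)
def pvSplit : List Char → List (List Char)
  | [] => [[]]
  | c :: cs =>
    let r := pvSplit cs
    if c = '|' then [] :: r else (c :: r.headI) :: r.tail

theorem pvSplit_ne_nil (s : List Char) : pvSplit s ≠ [] := by
  cases s <;> simp [pvSplit]
  split <;> simp

theorem pvSplit_go (fuel : Nat) (l cur : List Char) (acc : List (List Char))
    (h : l.length ≤ fuel) :
    PySem.Chars.splitOn.go ['|'] fuel l cur acc
      = acc.reverse ++ ((cur.reverse ++ (pvSplit l).headI) :: (pvSplit l).tail) := by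
  induction fuel generalizing l cur acc with
  | zero =>
    have : l = [] := by cases l <;> simp_all
    subst this
    rw [PySem.Chars.splitOn.go.eq_def]
    simp [pvSplit]
  | succ fuel ih =>
    cases l with
    | nil =>
      rw [PySem.Chars.splitOn.go.eq_def]
      simp [pvSplit]
    | cons c rest =>
      rw [PySem.Chars.splitOn.go.eq_def]
      have hpre : List.isPrefixOf ['|'] (c :: rest) = ('|' == c) := by
        show (('|' == c) && List.isPrefixOf [] rest) = ('|' == c)
        simp [List.isPrefixOf]
      simp only [hpre]
      by_cases hc : c = '|'
      · subst hc
        rw [if_pos (by simp)]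
        simp only [List.length_cons, List.length_nil, List.drop_succ_cons, List.drop_zero]
        rw [ih rest [] _ (by simpa using h)]
        have hne := pvSplit_ne_nil rest
        cases hr : pvSplit rest with
        | nil => exact absurd hr hne
        | cons a b => simp [pvSplit, hr]
      · rw [if_neg (by simp only [beq_iff_eq]; exact fun hh => hc hh.symm)]
        rw [ih rest (c :: cur) acc (by simpa using h)]
        simp [pvSplit, hc]

theorem splitOn_eq_pvSplit (s : List Char) : PySem.Chars.splitOn s ['|'] = pvSplit s := by
  have h := pvSplit_go (s.length + 1) s [] [] (by omega)
  have hne := pvSplit_ne_nil s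
  rw [PySem.Chars.splitOn] at *
  rw [h]
  cases hr : pvSplit s with
  | nil => exact absurd hr hne
  | cons a b => simp

theorem pvSplit_cons_pipe (s : List Char) : pvSplit ('|' :: s) = [] :: pvSplit s := by
  simp [pvSplit]

theorem pvSplit_concat_pipe (s : List Char) : pvSplit (s ++ ['|']) = pvSplit s ++ [[]] := by
  induction s with
  | nil => simp [pvSplit]
  | cons c cs ih =>
    simp only [List.cons_append, pvSplit, ih]
    have hne := pvSplit_ne_nil cs
    cases hr : pvSplit cs with
    | nil => exact absurd hr hne
    | cons a b =>
      by_cases hc : c = '|' <;> simp [hc]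

-- prepending a character does not change whether a nonempty row ends with "|"
theorem endswith_cons (c : Char) (row : List Char) (h : row ≠ []) :
    PySem.Chars.endswith (c :: row) ['|'] = PySem.Chars.endswith row ['|'] := by
  by_cases he : PySem.Chars.endswith row ['|'] = true
  · have := (PySem.Chars.endswith_iff row ['|']).1 he
    rw [he]
    exact (PySem.Chars.endswith_iff _ _).2 (this.trans (List.suffix_cons _ _))
  · have he' : PySem.Chars.endswith row ['|'] = false := by simpa using he
    rw [he']
    rw [← Bool.not_eq_true]
    intro hcons
    have := (PySem.Chars.endswith_iff _ _).1 hcons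
    rcases List.suffix_cons_iff.1 this with h1 | h2
    · cases row <;> simp_all
    · exact he ((PySem.Chars.endswith_iff _ _).2 h2)

-- A's wrap-then-split formatting cells equal B's _cells on a nonempty row
theorem wrap_cells (row : List Char) (hrow : row ≠ []) :
    ((PySem.Chars.splitOn
        (if ¬ PySem.Chars.endswith (if ¬ PySem.Chars.startswith row ['|'] then '|' :: row else row) ['|']
         then (if ¬ PySem.Chars.startswith row ['|'] then '|' :: row else row) ++ ['|']
         else (if ¬ PySem.Chars.startswith row ['|'] then '|' :: row else row))
        ['|']).drop 1).dropLast = pvCells row := by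
  have key1 : ∀ r1, (r1 = if ¬ PySem.Chars.startswith row ['|'] then '|' :: row else row) →
      (pvSplit r1).drop 1 = (if PySem.Chars.startswith row ['|'] then (pvSplit row).drop 1 else pvSplit row)
      ∧ PySem.Chars.endswith r1 ['|'] = PySem.Chars.endswith row ['|'] := by
    intro r1 hr1
    by_cases hsw : PySem.Chars.startswith row ['|'] = true
    · simp [hsw] at hr1; subst hr1; simp [hsw]
    · simp [hsw] at hr1 ⊢
      subst hr1
      exact ⟨by rw [pvSplit_cons_pipe]; simp, endswith_cons _ _ hrow⟩
  obtain ⟨k1, k2⟩ := key1 _ rfl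
  unfold pvCells
  simp only [splitOn_eq_pvSplit, k2]
  by_cases hew : PySem.Chars.endswith row ['|'] = true
  · simp only [hew]
    simp only [not_true, if_false, if_true]
    rw [k1]
  · have hew' : PySem.Chars.endswith row ['|'] = false := by simpa using hew
    simp only [hew', Bool.false_eq_true, not_false_iff, if_true, if_false]
    rw [pvSplit_concat_pipe]
    have hne : pvSplit (if ¬ PySem.Chars.startswith row ['|'] then '|' :: row else row) ≠ [] :=
      pvSplit_ne_nil _
    rw [List.drop_append_of_le_length (by cases h : pvSplit (if ¬ PySem.Chars.startswith row ['|'] then '|' :: row else row) <;> simp_all)]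
    rw [List.dropLast_concat, k1]

-- pad-while loop is pad-with-replicate
theorem pvPadWhile_eq (cells : List (List Char)) (m : Nat) :
    pvPadWhile cells m = cells ++ List.replicate (m - cells.length) [] := by
  generalize hk : m - cells.length = k
  induction k generalizing cells with
  | zero =>
    rw [pvPadWhile, if_neg (by omega)]
    simp
  | succ k ih =>
    rw [pvPadWhile, if_pos (by omega)]
    rw [ih (cells ++ [[]]) (by simp; omega)]
    simp [List.replicate_succ]

def pvJo (g : List (List Char)) : List Char := PySem.Chars.join [' '] g

theorem pvJo_merge (a b : List Char) (l : List (List Char)) :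
    pvJo ((a ++ ' ' :: b) :: l) = pvJo (a :: b :: l) := by
  cases l with
  | nil => simp [pvJo, PySem.Chars.join_singleton, PySem.Chars.join_cons_cons]
  | cons x xs => simp [pvJo, PySem.Chars.join_cons_cons]

theorem pvJo_ne_nil (g : List (List Char)) (h : g ≠ []) (h2 : ∀ s ∈ g, s ≠ []) :
    pvJo g ≠ [] := by
  cases g with
  | nil => exact absurd rfl h
  | cons a t =>
    cases t with
    | nil => simpa [pvJo, PySem.Chars.join_singleton] using h2 a (by simp)
    | cons b t' =>
      have : pvJo (a :: b :: t') = a ++ [' '] ++ pvJo (b :: t') := by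
        simp [pvJo, PySem.Chars.join_cons_cons]
      rw [this]
      simp

-- proof-side grouping by runs (same recursion as pvRowsB, on merged strings)
def pvGroups : List (List Char) → List (List (List Char))
  | [] => []
  | s :: t =>
      (s :: t.takeWhile (fun x => !pvIsOpener x)) :: pvGroups (t.dropWhile (fun x => !pvIsOpener x))
  termination_by l => l.length
  decreasing_by
    have := List.length_dropWhile_le (fun x => !pvIsOpener x) t
    simp; omega

theorem pvRowsB_eq_map : ∀ (n : Nat) (kept : List (List Char)), kept.length ≤ n →
    pvRowsB kept = (pvGroups kept).map (fun g => pvCells (pvJo g)) := by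
  intro n
  induction n with
  | zero => intro kept h; have : kept = [] := by cases kept <;> simp_all
            subst this; simp [pvRowsB, pvGroups]
  | succ n ih =>
    intro kept h
    cases kept with
    | nil => simp [pvRowsB, pvGroups]
    | cons s t =>
      rw [pvRowsB, pvGroups]
      have hle := List.length_dropWhile_le (fun x => !pvIsOpener x) t
      rw [ih _ (by simp at h; omega)]
      rfl

theorem pvGroups_wf : ∀ (n : Nat) (kept : List (List Char)), kept.length ≤ n →
    ∀ g ∈ pvGroups kept, g ≠ [] ∧ ∀ s ∈ g, s ∈ kept := by
  intro n
  induction n with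
  | zero => intro kept h; have : kept = [] := by cases kept <;> simp_all
            subst this; intro g hg; simp [pvGroups] at hg
  | succ n ih =>
    intro kept h
    cases kept with
    | nil => intro g hg; simp [pvGroups] at hg
    | cons s t =>
      rw [pvGroups]
      intro g hg
      rcases List.mem_cons.1 hg with rfl | hg'
      · refine ⟨by simp, ?_⟩
        intro x hx
        rcases List.mem_cons.1 hx with rfl | hx'
        · simp
        · exact List.mem_cons_of_mem _ ((List.takeWhile_sublist _).mem hx')
      · have hle := List.length_dropWhile_le (fun x => !pvIsOpener x) t
        obtain ⟨h1, h2⟩ := ih _ (by simp at h; omega) g hg'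
        exact ⟨h1, fun x hx => List.mem_cons_of_mem _ ((List.dropWhile_sublist _).mem (h2 x hx))⟩

-- A's step on an already-stripped, nonempty line
def pvAStep' (st : List (List Char) × Option (List Char)) (e : List Char) :
    List (List Char) × Option (List Char) :=
  if pvIsTable e then
    match st.2 with
    | some c => (st.1 ++ [c], some e)
    | none => (st.1, some e)
  else
    match st.2 with
    | some c => (st.1, some (c ++ ' ' :: e))
    | none => (st.1, some e)

theorem fold_strip (lines : List (List Char)) (st : List (List Char) × Option (List Char)) :
    lines.foldl pvAStep st
      = (((lines.map PySem.Chars.strip).filter (fun s => !s.isEmpty)).foldl pvAStep' st) := by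
  induction lines generalizing st with
  | nil => rfl
  | cons l ls ih =>
    simp only [List.foldl_cons, List.map_cons, List.filter_cons]
    by_cases hs : PySem.Chars.strip l = []
    · have : pvAStep st l = st := by simp [pvAStep, hs]
      rw [this, hs]
      simpa using ih st
    · have hne : ((PySem.Chars.strip l).isEmpty = false) := by
        cases h : PySem.Chars.strip l <;> simp_all
      rw [hne]
      have : pvAStep st l = pvAStep' st (PySem.Chars.strip l) := by
        simp [pvAStep, pvAStep', hs]
      rw [this]
      simpa using ih _

def pvFinalize (st : List (List Char) × Option (List Char)) : List (List Char) :=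
  match st.2 with
  | some c => st.1 ++ [c]
  | none => st.1

-- the step-1 simulation: A's accumulator fold over kept lines yields the run groups
theorem fold_sim (kept : List (List Char)) :
    ∀ (rows : List (List Char)) (c : List Char),
    pvFinalize (kept.foldl pvAStep' (rows, some c))
      = rows ++ (((c :: kept.takeWhile (fun x => !pvIsOpener x))
            :: pvGroups (kept.dropWhile (fun x => !pvIsOpener x))).map pvJo) := by
  induction kept with
  | nil =>
    intro rows c
    simp [pvFinalize, pvJo, PySem.Chars.join_singleton, pvGroups]
  | cons s t ih =>
    intro rows c
    by_cases ht : pvIsTable s = true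
    · have hop : pvIsOpener s = true := ht
      have hstep : pvAStep' (rows, some c) s = (rows ++ [c], some s) := by
        simp [pvAStep', ht]
      simp only [List.foldl_cons, hstep, List.takeWhile_cons, List.dropWhile_cons, hop,
        Bool.not_true, Bool.false_eq_true, if_false, ih]
      rw [pvGroups]
      simp [pvJo, PySem.Chars.join_singleton]
    · have hop : pvIsOpener s = false := by
        cases h : pvIsOpener s
        · rfl
        · exact absurd h ht
      have hstep : pvAStep' (rows, some c) s = (rows, some (c ++ ' ' :: s)) := by
        simp [pvAStep', ht]
      simp only [List.foldl_cons, hstep, List.takeWhile_cons, List.dropWhile_cons, hop,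
        Bool.not_false, if_true, ih]
      rw [List.map_cons, List.map_cons, pvJo_merge]

-- A's table_rows are the joined run groups of the kept (stripped, nonempty) lines
theorem table_rows_eq (lines : List (List Char)) :
    pvFinalize (lines.foldl pvAStep ([], none))
      = (pvGroups ((lines.map PySem.Chars.strip).filter (fun s => !s.isEmpty))).map pvJo := by
  rw [fold_strip]
  cases hk : (lines.map PySem.Chars.strip).filter (fun s => !s.isEmpty) with
  | nil => simp [pvFinalize, pvGroups]
  | cons s t =>
    have hfirst : pvAStep' ([], none) s = ([], some s) := by
      unfold pvAStep'
      split <;> rfl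
    rw [List.foldl_cons, hfirst, fold_sim, pvGroups]
    simp

-- ===== VERDICT (by name: the statement is the Claim_ definition above) =====
theorem clean_markdown_table_spec : Claim_equal_clean_markdown_table := by
  intro text _
  unfold Spec_clean_markdown_table clean_markdown_table clean_markdown_table_alt
  have htr := table_rows_eq (PySem.Chars.splitlines text.toList)
  set kept := ((PySem.Chars.splitlines text.toList).map PySem.Chars.strip).filter (fun s => !s.isEmpty) with hkept
  have hwf := pvGroups_wf kept.length kept (le_refl _)
  have hknn : ∀ s ∈ kept, s ≠ [] := by
    intro s hs
    have := List.of_mem_filter hs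
    cases s <;> simp_all
  have hgnn : ∀ g ∈ pvGroups kept, pvJo g ≠ [] := by
    intro g hg
    obtain ⟨h1, h2⟩ := hwf g hg
    exact pvJo_ne_nil g h1 (fun s hs => hknn s (h2 s hs))
  unfold pvFinalize at htr
  simp only [pvRowsB_eq_map kept.length kept (le_refl _), htr]
  have hmax : List.foldl
      (fun m row =>
        max m
          (if PySem.Chars.endswith row ['|'] = true then
              (if PySem.Chars.startswith row ['|'] = true then List.drop 1 (PySem.Chars.splitOn row ['|'])
                else PySem.Chars.splitOn row ['|']).dropLast
            else
              if PySem.Chars.startswith row ['|'] = true then List.drop 1 (PySem.Chars.splitOn row ['|'])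
              else PySem.Chars.splitOn row ['|']).length)
      0 (List.map pvJo (pvGroups kept))
      = List.foldl (fun m c => max m c.length) 0
          ((pvGroups kept).map (fun g => pvCells (pvJo g))) := by
    rw [List.foldl_map, List.foldl_map]
    rfl
  simp only [hmax, PySem.List.foldl_append_singleton_eq_map, List.nil_append]
  apply congrArg
  apply congrArg
  simp only [List.map_map]
  apply List.map_congr_left
  intro g hg
  have hrne : pvJo g ≠ [] := hgnn g hg
  simp only [Function.comp_apply, pvFormatRow]
  rw [wrap_cells _ hrne, pvPadWhile_eq]
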